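-- pv_equiv track=rewrite | github.com/JuliaKkkkkk/nlp-projects | HMM tagger/code/HMM_tagger.py | train_counts
-- ===== SOURCE A (Python) =====
-- def train_counts(train_set, train_bag):
--     """
--     Вычисляет счётчики начальных тегов, переходов и эмиссий.
--     Возвращает init_counts, tag_counts, emit_counts, trans_counts.
--     """
--     from collections import Counter, defaultdict
--     init_counts = Counter()
--     tag_counts = Counter()
--     emit_counts = defaultdict(Counter)
--     trans_counts = defaultdict(Counter)
--
--     for sent in train_set:
--         first_tag = sent[0][1]
--         init_counts[first_tag] += 1
--         tag_counts[first_tag] += 1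
--         emit_counts[first_tag][sent[0][0]] += 1
--         prev_tag = first_tag
--         for word, tag in sent[1:]:
--             tag_counts[tag] += 1
--             emit_counts[tag][word] += 1
--             trans_counts[prev_tag][tag] += 1
--             prev_tag = tag
--     return init_counts, tag_counts, emit_counts, trans_counts
-- ===== SOURCE B (Python) =====
-- def train_counts(train_set, train_bag):
--     """Bulk multiset counting: flatten the corpus into streams (first tags,
--     tokens, adjacent tag pairs), count each stream with one Counter() call,
--     and regroup the flat pair-Counters into the nested dicts afterwards."""
--     from collections import Counter, defaultdict
--
--     init_counts = Counter(sent[0][1] for sent in train_set)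
--
--     tokens = [tok for sent in train_set for tok in sent]
--     tag_counts = Counter(tag for _, tag in tokens)
--
--     emit_counts = defaultdict(Counter)
--     for (tag, word), n in Counter((tag, word) for word, tag in tokens).items():
--         emit_counts[tag][word] = n
--
--     pairs = [(a[1], b[1]) for sent in train_set for a, b in zip(sent, sent[1:])]
--     trans_counts = defaultdict(Counter)
--     for (t1, t2), n in Counter(pairs).items():
--         trans_counts[t1][t2] = n
--
--     return init_counts, tag_counts, emit_counts, trans_counts
-- ===== Notes on version B (the rewrite author's own statement) =====
-- stated objective: alternative
-- what changed: Replaced A's single accumulator-threaded loop (prev_tag state, per-key increments into four dicts at once) by bulk multiset counting: the corpus is flattened into three streams (first tags, tokens, adjacent tag pairs), each counted with one Counter() call, and the two flat pair-Counters are regrouped into the nested dicts afterwards.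
import Mathlib
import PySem

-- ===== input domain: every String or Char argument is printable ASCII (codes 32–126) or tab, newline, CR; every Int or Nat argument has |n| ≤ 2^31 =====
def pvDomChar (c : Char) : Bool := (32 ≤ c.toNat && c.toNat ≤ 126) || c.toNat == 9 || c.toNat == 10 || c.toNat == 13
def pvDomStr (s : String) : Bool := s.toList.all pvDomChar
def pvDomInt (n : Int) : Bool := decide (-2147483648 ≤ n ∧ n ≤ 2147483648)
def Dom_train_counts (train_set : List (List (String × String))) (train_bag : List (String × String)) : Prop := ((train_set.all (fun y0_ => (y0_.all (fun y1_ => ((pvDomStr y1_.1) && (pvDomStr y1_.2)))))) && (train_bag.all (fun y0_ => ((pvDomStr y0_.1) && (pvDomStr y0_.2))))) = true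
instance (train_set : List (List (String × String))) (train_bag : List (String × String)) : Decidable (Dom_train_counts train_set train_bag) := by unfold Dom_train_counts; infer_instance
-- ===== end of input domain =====

-- B replaces A's single accumulator-threaded loop by bulk multiset counting: flatten the corpus
-- into streams, count each with one Counter() call, regroup the flat pair-Counters into the
-- nested dicts afterwards (objective: alternative).

-- shared primitive: Counter[k] += 1  (A's per-key increment)
def pvBump (d : PySem.Dict String Int) (t : String) : PySem.Dict String Int :=
  d.modify t 0 (· + 1)

-- shared primitive: defaultdict(Counter)  d[k][w] += 1
def pvBump2 (d : PySem.Dict String (PySem.Dict String Int)) (k w : String) :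
    PySem.Dict String (PySem.Dict String Int) :=
  d.modify k PySem.Dict.empty (fun c => c.modify w 0 (· + 1))

abbrev pvCtrs := PySem.Dict String Int × PySem.Dict String Int ×
  PySem.Dict String (PySem.Dict String Int) × PySem.Dict String (PySem.Dict String Int)

-- shared final conversion: the four dicts rendered as association lists (the stated return type)
def pvOut (r : pvCtrs) :
    (List (String × Int)) × (List (String × Int)) × (List (String × List (String × Int))) × (List (String × List (String × Int))) :=
  (r.1.items, r.2.1.items,
   r.2.2.1.items.map (fun p => (p.1, p.2.items)),
   r.2.2.2.items.map (fun p => (p.1, p.2.items)))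

-- ===== PORT A =====
-- A's per-sentence step: sent[0] handled separately, then one combined loop over sent[1:]
-- threading prev_tag through the fold state.  ([] case unreachable under Pre_: Python raises IndexError.)
def trainStepA (st : pvCtrs) (sent : List (String × String)) : pvCtrs :=
  match sent with
  | [] => st
  | (w0, t0) :: rest =>
    let init := pvBump st.1 t0
    let tagc := pvBump st.2.1 t0
    let emit := pvBump2 st.2.2.1 t0 w0
    let q := rest.foldl
      (fun (q : PySem.Dict String Int × PySem.Dict String (PySem.Dict String Int) ×
                PySem.Dict String (PySem.Dict String Int) × String) wt =>
        (pvBump q.1 wt.2, pvBump2 q.2.1 wt.2 wt.1, pvBump2 q.2.2.1 q.2.2.2 wt.2, wt.2))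
      (tagc, emit, st.2.2.2, t0)
    (init, q.1, q.2.1, q.2.2.1)

def train_counts (train_set : List (List (String × String))) (train_bag : List (String × String)) : (List (String × Int)) × (List (String × Int)) × (List (String × List (String × Int))) × (List (String × List (String × Int))) :=
  pvOut (train_set.foldl trainStepA
    (PySem.Dict.empty, PySem.Dict.empty, PySem.Dict.empty, PySem.Dict.empty))

-- ===== PORT B =====
-- sent[0][1]  ([] unreachable under Pre_: Python raises IndexError there)
def pvFirstTag (sent : List (String × String)) : String :=
  match sent with
  | [] => ""
  | (_, t) :: _ => t

-- Source B's regroup loop:  for (k, w), n in C.items(): d[k][w] = n   (d a defaultdict(Counter))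
def pvRegroup (c : PySem.Dict (String × String) Int) :
    PySem.Dict String (PySem.Dict String Int) :=
  c.items.foldl
    (fun d q => d.modify q.1.1 PySem.Dict.empty (fun inner => inner.insert q.1.2 q.2))
    PySem.Dict.empty

def train_counts_alt (train_set : List (List (String × String))) (train_bag : List (String × String)) : (List (String × Int)) × (List (String × Int)) × (List (String × List (String × Int))) × (List (String × List (String × Int))) :=
  let init := PySem.Dict.counter (train_set.map pvFirstTag)
  let tokens := train_set.flatMap id
  let tagc := PySem.Dict.counter (tokens.map (·.2))
  let emit := pvRegroup (PySem.Dict.counter (tokens.map (fun wt => (wt.2, wt.1))))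
  let pairs := train_set.flatMap (fun s => (s.zip s.tail).map (fun ab => (ab.1.2, ab.2.2)))
  let trans := pvRegroup (PySem.Dict.counter pairs)
  pvOut (init, tagc, emit, trans)

-- ===== PRECONDITION & SPEC =====
-- Pre_ excludes train_sets containing an empty sentence: there Python A raises IndexError at
-- sent[0] (and B raises the same way at sent[0][1]), so no value is claimed.
def Pre_train_counts (train_set : List (List (String × String))) (train_bag : List (String × String)) : Prop :=
  ∀ sent ∈ train_set, sent ≠ []
instance (train_set : List (List (String × String))) (train_bag : List (String × String)) : Decidable (Pre_train_counts train_set train_bag) := by unfold Pre_train_counts; infer_instance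
def pvWitness_train_counts : (List (List (String × String))) × (List (String × String)) :=
  ([[("the", "D"), ("dog", "N")], [("runs", "V")]], [("the", "D")])

def Spec_train_counts (train_set : List (List (String × String))) (train_bag : List (String × String)) (out : (List (String × Int)) × (List (String × Int)) × (List (String × List (String × Int))) × (List (String × List (String × Int)))) : Prop := out = train_counts_alt train_set train_bag
-- explicit DecidableEq for the output type (plain instance search is too slow here)
def pvDecEqCnt : DecidableEq (List (String × Int)) := by infer_instance
def pvDecEqNested : DecidableEq (List (String × List (String × Int))) := by infer_instance
def pvDecEqOut : DecidableEq ((List (String × Int)) × (List (String × Int)) × (List (String × List (String × Int))) × (List (String × List (String × Int)))) :=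
  @instDecidableEqProd _ _ pvDecEqCnt (@instDecidableEqProd _ _ pvDecEqCnt (@instDecidableEqProd _ _ pvDecEqNested pvDecEqNested))
instance (train_set : List (List (String × String))) (train_bag : List (String × String)) (out : (List (String × Int)) × (List (String × Int)) × (List (String × List (String × Int))) × (List (String × List (String × Int)))) : Decidable (Spec_train_counts train_set train_bag out) := by unfold Spec_train_counts; exact pvDecEqOut out (train_counts_alt train_set train_bag)

-- ===== CLAIM (what is proved, stated in full; the proofs are below) =====
def Claim_equal_train_counts : Prop := ∀ (train_set : List (List (String × String))) (train_bag : List (String × String)), Dom_train_counts train_set train_bag → Pre_train_counts train_set train_bag → Spec_train_counts train_set train_bag (train_counts train_set train_bag)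

-- ===== LEMMAS AND PROOFS =====

theorem pvInsert_comm {ν : Type} (d : PySem.Dict String ν) (k k' : String) (v w : ν)
    (hc : d.contains k = true) (hne : k' ≠ k) :
    (d.insert k v).insert k' w = (d.insert k' w).insert k v := by
  have hk' : (d.insert k v).contains k' = d.contains k' := by
    rw [PySem.Dict.contains_insert]; simp [hne]
  have hk : (d.insert k' w).contains k = true := by
    rw [PySem.Dict.contains_insert]; simp [hc]
  apply PySem.Dict.ext
  by_cases h' : d.contains k' = true
  · rw [PySem.Dict.items_insert_of_contains _ _ (by rw [hk']; exact h'),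
        PySem.Dict.items_insert_of_contains _ _ hc,
        PySem.Dict.items_insert_of_contains _ _ hk,
        PySem.Dict.items_insert_of_contains _ _ h',
        List.map_map, List.map_map]
    apply List.map_congr_left; intro p _
    by_cases hpk : p.1 = k <;> by_cases hpk' : p.1 = k' <;>
      simp_all [Function.comp, Ne.symm hne]
  · rw [PySem.Dict.items_insert_of_not_contains _ _ (by rw [hk']; simpa using h'),
        PySem.Dict.items_insert_of_contains _ _ hc,
        PySem.Dict.items_insert_of_contains _ _ hk,
        PySem.Dict.items_insert_of_not_contains _ _ (by simpa using h'),
        List.map_append]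
    simp [hne]

def pvRStep (d : PySem.Dict String (PySem.Dict String Int)) (q : (String × String) × Int) :
    PySem.Dict String (PySem.Dict String Int) :=
  d.modify q.1.1 PySem.Dict.empty (fun inner => inner.insert q.1.2 q.2)

theorem pvRStep_inner_contains (d : PySem.Dict String (PySem.Dict String Int))
    (k w : String) (q : (String × String) × Int) :
    ((pvRStep d q).getD k PySem.Dict.empty).contains w
      = ((d.getD k PySem.Dict.empty).contains w || q.1 == (k, w)) := by
  unfold pvRStep PySem.Dict.modify
  by_cases hk : k = q.1.1
  · subst hk
    rw [PySem.Dict.getD_insert]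
    by_cases hw : w = q.1.2
    · simp_all [Bool.or_comm]
    · rw [if_pos rfl, PySem.Dict.contains_insert,
         beq_eq_false_iff_ne.mpr hw,
         beq_eq_false_iff_ne.mpr (show q.1 ≠ (q.1.1, w) by simp [Prod.ext_iff]; exact fun h => hw h.symm)]
      simp
  · rw [PySem.Dict.getD_insert_of_ne _ _ _ hk]
    rw [beq_eq_false_iff_ne.mpr (show q.1 ≠ (k, w) by simp [Prod.ext_iff]; exact fun h _ => hk h.symm)]
    simp

theorem pvRegroup_inner_contains (l : List ((String × String) × Int))
    (d : PySem.Dict String (PySem.Dict String Int)) (k w : String) :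
    ((l.foldl pvRStep d).getD k PySem.Dict.empty).contains w
      = (((d.getD k PySem.Dict.empty).contains w) || l.any (fun q => q.1 == (k, w))) := by
  induction l generalizing d with
  | nil => simp
  | cons q l ih =>
    simp only [List.foldl_cons, List.any_cons]
    rw [ih, pvRStep_inner_contains, Bool.or_assoc]

theorem pvBump2_rstep_comm (d : PySem.Dict String (PySem.Dict String Int))
    (k w : String) (q : (String × String) × Int) (hq : q.1 ≠ (k, w))
    (hck : d.contains k = true)
    (hcw : (d.getD k PySem.Dict.empty).contains w = true) :
    pvRStep (pvBump2 d k w) q = pvBump2 (pvRStep d q) k w := by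
  unfold pvRStep pvBump2 PySem.Dict.modify
  by_cases houter : q.1.1 = k
  · subst houter
    have hw : q.1.2 ≠ w := fun h => hq (Prod.ext rfl h)
    simp only [PySem.Dict.getD_insert_self, PySem.Dict.insert_insert_self]
    rw [PySem.Dict.getD_insert_of_ne _ _ _ (Ne.symm hw),
        pvInsert_comm _ _ _ _ _ hcw hw]
  · simp only [PySem.Dict.getD_insert_of_ne _ _ _ houter,
        PySem.Dict.getD_insert_of_ne _ _ _ (fun h => houter h.symm)]
    rw [pvInsert_comm _ _ _ _ _ hck (fun h => houter h)]

theorem pvBump2_fold_comm (l : List ((String × String) × Int))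
    (d : PySem.Dict String (PySem.Dict String Int)) (k w : String)
    (hl : ∀ q ∈ l, q.1 ≠ (k, w))
    (hck : d.contains k = true)
    (hcw : (d.getD k PySem.Dict.empty).contains w = true) :
    l.foldl pvRStep (pvBump2 d k w) = pvBump2 (l.foldl pvRStep d) k w := by
  induction l generalizing d with
  | nil => rfl
  | cons q l ih =>
    simp only [List.foldl_cons]
    rw [pvBump2_rstep_comm d k w q (hl q (by simp)) hck hcw]
    refine ih _ (fun x hx => hl x (by simp [hx])) ?_ ?_
    · unfold pvRStep PySem.Dict.modify
      rw [PySem.Dict.contains_insert]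
      simp [hck]
    · rw [pvRStep_inner_contains, hcw]
      simp

theorem pvRStep_succ (R0 : PySem.Dict String (PySem.Dict String Int)) (k w : String) (n : Int) :
    pvRStep R0 ((k, w), n + 1) = pvBump2 (pvRStep R0 ((k, w), n)) k w := by
  unfold pvRStep pvBump2 PySem.Dict.modify
  simp only [PySem.Dict.getD_insert_self, PySem.Dict.insert_insert_self]

theorem pvRStep_one (R : PySem.Dict String (PySem.Dict String Int)) (k w : String)
    (h : (R.getD k PySem.Dict.empty).contains w = false) :
    pvRStep R ((k, w), 0 + 1) = pvBump2 R k w := by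
  unfold pvRStep pvBump2 PySem.Dict.modify
  simp only []
  rw [PySem.Dict.getD_of_not_contains _ _ h]

theorem pvRegroup_modify (c : PySem.Dict (String × String) Int) (hnd : c.keys.Nodup)
    (k w : String) :
    (c.modify (k, w) 0 (· + 1)).items.foldl pvRStep PySem.Dict.empty
      = pvBump2 (c.items.foldl pvRStep PySem.Dict.empty) k w := by
  unfold PySem.Dict.modify
  by_cases hc : c.contains (k, w) = true
  · -- the pair is already counted: its value is replaced in place
    have hmemk : (k, w) ∈ c.items.map (·.1) := by
      unfold PySem.Dict.contains at hc
      rw [List.any_eq_true] at hc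
      obtain ⟨q, hq, hbeq⟩ := hc
      exact List.mem_map.mpr ⟨q, hq, by simpa using hbeq⟩
    obtain ⟨q, hqmem, hq1⟩ := List.mem_map.mp hmemk
    obtain ⟨n, rfl⟩ : ∃ n, q = ((k, w), n) := ⟨q.2, by rw [← hq1]⟩
    obtain ⟨a, b, hsplit⟩ := List.append_of_mem hqmem
    have hkeys : c.keys = a.map (·.1) ++ (k, w) :: b.map (·.1) := by
      show c.items.map (·.1) = _
      rw [hsplit]; simp
    rw [hkeys] at hnd
    have hnotab : (k, w) ∉ a.map (·.1) ∧ (k, w) ∉ b.map (·.1) := by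
      simp only [List.nodup_append, List.nodup_cons] at hnd
      exact ⟨fun hm => hnd.2.2 _ hm _ (by simp) rfl, hnd.2.1.1⟩
    have hgetD : c.getD (k, w) 0 = n := PySem.Dict.getD_of_mem_items _ hqmem (by rw [hkeys]; exact hnd) 0
    rw [hgetD, PySem.Dict.items_insert_of_contains _ _ hc, hsplit]
    have hrepl :
        List.map (fun p => if (p.1 == ((k, w) : String × String)) = true then ((k, w), n + 1) else p)
          (a ++ ((k, w), n) :: b)
        = a ++ ((k, w), n + 1) :: b := by
      rw [List.map_append, List.map_cons]
      congr 1
      · conv_rhs => rw [← List.map_id a]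
        apply List.map_congr_left
        intro p hp
        have : p.1 ≠ (k, w) := fun h => hnotab.1 (h ▸ List.mem_map_of_mem hp)
        simp [this]
      · congr 1
        · simp
        · conv_rhs => rw [← List.map_id b]
          apply List.map_congr_left
          intro p hp
          have : p.1 ≠ (k, w) := fun h => hnotab.2 (h ▸ List.mem_map_of_mem hp)
          simp [this]
    rw [hrepl]
    simp only [List.foldl_append, List.foldl_cons]
    rw [pvRStep_succ]
    rw [pvBump2_fold_comm b _ k w
      (fun x hx => fun h => hnotab.2 (h ▸ List.mem_map_of_mem hx))
      (by unfold pvRStep PySem.Dict.modify; exact PySem.Dict.contains_insert_self _ _ _)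
      (by unfold pvRStep PySem.Dict.modify
          simp only [PySem.Dict.getD_insert_self]
          exact PySem.Dict.contains_insert_self _ _ _)]
  · -- fresh pair: appended with count 1
    have hfalse : c.contains (k, w) = false := by simpa using hc
    rw [PySem.Dict.getD_of_not_contains _ _ hfalse,
        PySem.Dict.items_insert_of_not_contains _ _ hfalse,
        List.foldl_append]
    simp only [List.foldl_cons, List.foldl_nil]
    have hinner : ((c.items.foldl pvRStep PySem.Dict.empty).getD k PySem.Dict.empty).contains w = false := by
      rw [pvRegroup_inner_contains]
      have : c.items.any (fun q => q.1 == (k, w)) = false := hfalse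
      rw [this]
      simp
    exact pvRStep_one _ k w hinner

theorem pvRegroup_counter_gen (L : List (String × String)) (c : PySem.Dict (String × String) Int)
    (hnd : c.keys.Nodup) :
    (L.foldl (fun d p => d.modify p 0 (· + 1)) c).items.foldl pvRStep PySem.Dict.empty
      = L.foldl (fun d p => pvBump2 d p.1 p.2) (c.items.foldl pvRStep PySem.Dict.empty) := by
  induction L generalizing c with
  | nil => rfl
  | cons p L ih =>
    simp only [List.foldl_cons]
    obtain ⟨k, w⟩ := p
    have hnd' : (c.modify (k, w) 0 (· + 1)).keys.Nodup := by
      rw [PySem.Dict.keys_modify]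
      exact PySem.Dict.nodup_keys_insert _ _ _ hnd
    rw [ih _ hnd', pvRegroup_modify c hnd k w]

theorem pvRegroup_counter_items (L : List (String × String)) :
    (PySem.Dict.counter L).items.foldl pvRStep PySem.Dict.empty
      = L.foldl (fun d p => pvBump2 d p.1 p.2) PySem.Dict.empty := by
  rw [PySem.Dict.counter_eq_foldl]
  exact pvRegroup_counter_gen L PySem.Dict.empty PySem.Dict.nodup_keys_empty

theorem pvRegroup_eq_foldl (c : PySem.Dict (String × String) Int) :
    pvRegroup c = c.items.foldl pvRStep PySem.Dict.empty := rfl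

theorem pvRegroup_counter (L : List (String × String)) :
    pvRegroup (PySem.Dict.counter L)
      = L.foldl (fun d p => pvBump2 d p.1 p.2) PySem.Dict.empty := by
  rw [pvRegroup_eq_foldl]
  exact pvRegroup_counter_items L

-- ===== A-side restructuring (reused shape lemmas) =====

-- A's combined inner fold splits into three independent folds (the state components never interact).
theorem pvSplitA (rest : List (String × String)) (tagc : PySem.Dict String Int)
    (emit trans : PySem.Dict String (PySem.Dict String Int)) (prev : String) :
    rest.foldl
      (fun (q : PySem.Dict String Int × PySem.Dict String (PySem.Dict String Int) ×
                PySem.Dict String (PySem.Dict String Int) × String) wt =>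
        (pvBump q.1 wt.2, pvBump2 q.2.1 wt.2 wt.1, pvBump2 q.2.2.1 q.2.2.2 wt.2, wt.2))
      (tagc, emit, trans, prev)
    = (rest.foldl (fun d wt => pvBump d wt.2) tagc,
       rest.foldl (fun d wt => pvBump2 d wt.2 wt.1) emit,
       (rest.foldl (fun (q : PySem.Dict String (PySem.Dict String Int) × String) wt =>
          (pvBump2 q.1 q.2 wt.2, wt.2)) (trans, prev)).1,
       (rest.foldl (fun (q : PySem.Dict String (PySem.Dict String Int) × String) wt =>
          (pvBump2 q.1 q.2 wt.2, wt.2)) (trans, prev)).2) := by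
  induction rest generalizing tagc emit trans prev with
  | nil => rfl
  | cons wt rest ih => simpa using ih (pvBump tagc wt.2) (pvBump2 emit wt.2 wt.1) (pvBump2 trans prev wt.2) wt.2

-- prev_tag-threaded transition fold = fold over adjacent pairs.
theorem pvZipTrans (rest : List (String × String)) (w0 prev : String)
    (trans : PySem.Dict String (PySem.Dict String Int)) :
    (rest.foldl (fun (q : PySem.Dict String (PySem.Dict String Int) × String) wt =>
        (pvBump2 q.1 q.2 wt.2, wt.2)) (trans, prev)).1
    = (((w0, prev) :: rest).zip rest).foldl (fun d pq => pvBump2 d pq.1.2 pq.2.2) trans := by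
  induction rest generalizing w0 prev trans with
  | nil => rfl
  | cons wt rest ih =>
    simpa [List.zip] using ih wt.1 wt.2 (pvBump2 trans prev wt.2)

-- A's per-sentence step acts componentwise on the four dicts (nonempty sentence)
def pvStepInit (d : PySem.Dict String Int) (s : List (String × String)) : PySem.Dict String Int :=
  pvBump d (pvFirstTag s)
def pvStepTag (d : PySem.Dict String Int) (s : List (String × String)) : PySem.Dict String Int :=
  s.foldl (fun d wt => pvBump d wt.2) d
def pvStepEmit (d : PySem.Dict String (PySem.Dict String Int)) (s : List (String × String)) :
    PySem.Dict String (PySem.Dict String Int) :=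
  s.foldl (fun d wt => pvBump2 d wt.2 wt.1) d
def pvStepTrans (d : PySem.Dict String (PySem.Dict String Int)) (s : List (String × String)) :
    PySem.Dict String (PySem.Dict String Int) :=
  (s.zip s.tail).foldl (fun d ab => pvBump2 d ab.1.2 ab.2.2) d

theorem pvStepA_componentwise (st : pvCtrs) (s : List (String × String)) (h : s ≠ []) :
    trainStepA st s
      = (pvStepInit st.1 s, pvStepTag st.2.1 s, pvStepEmit st.2.2.1 s, pvStepTrans st.2.2.2 s) := by
  match s with
  | [] => exact absurd rfl h
  | (w0, t0) :: rest =>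
    simp only [trainStepA, pvStepInit, pvStepTag, pvStepEmit, pvStepTrans, pvFirstTag,
      List.foldl_cons, List.tail_cons]
    rw [pvSplitA, pvZipTrans rest w0 t0]

-- the outer fold over sentences splits into four independent folds
theorem pvFoldSplit4 (ts : List (List (String × String))) (h : ∀ s ∈ ts, s ≠ [])
    (a b : PySem.Dict String Int) (c d : PySem.Dict String (PySem.Dict String Int)) :
    ts.foldl trainStepA (a, b, c, d)
      = (ts.foldl pvStepInit a, ts.foldl pvStepTag b, ts.foldl pvStepEmit c, ts.foldl pvStepTrans d) := by
  induction ts generalizing a b c d with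
  | nil => rfl
  | cons s ts ih =>
    simp only [List.foldl_cons]
    rw [pvStepA_componentwise (a, b, c, d) s (h s (by simp))]
    exact ih (fun x hx => h x (by simp [hx])) _ _ _ _

-- ===== B-side restructuring: each counter call is the corresponding stream fold =====

theorem pvB_init (ts : List (List (String × String))) :
    PySem.Dict.counter (ts.map pvFirstTag) = ts.foldl pvStepInit PySem.Dict.empty := by
  rw [PySem.Dict.counter_eq_foldl, List.foldl_map]; rfl

theorem pvB_tag (ts : List (List (String × String))) :
    PySem.Dict.counter ((ts.flatMap id).map (·.2)) = ts.foldl pvStepTag PySem.Dict.empty := by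
  rw [PySem.Dict.counter_eq_foldl, List.foldl_map, List.foldl_flatMap]; rfl

theorem pvB_emit (ts : List (List (String × String))) :
    pvRegroup (PySem.Dict.counter ((ts.flatMap id).map (fun wt => (wt.2, wt.1))))
      = ts.foldl pvStepEmit PySem.Dict.empty := by
  rw [pvRegroup_counter, List.foldl_map, List.foldl_flatMap]; rfl

theorem pvB_trans (ts : List (List (String × String))) :
    pvRegroup (PySem.Dict.counter
        (ts.flatMap (fun s => (s.zip s.tail).map (fun ab => (ab.1.2, ab.2.2)))))
      = ts.foldl pvStepTrans PySem.Dict.empty := by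
  rw [pvRegroup_counter, List.foldl_flatMap]
  simp only [List.foldl_map]; rfl

-- ===== VERDICT (by name: the statement is the Claim_ definition above) =====
theorem train_counts_spec : Claim_equal_train_counts := by
  intro ts tb _ hpre
  unfold Spec_train_counts train_counts train_counts_alt
  rw [pvFoldSplit4 ts hpre]
  simp only [pvB_init, pvB_tag, pvB_emit, pvB_trans]
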